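-- pv_equiv track=rewrite | github.com/00Alex16/chat_sockets_app | chat_sockets_server/Command.py | getMsgToSend
-- ===== SOURCE A (Python) =====
-- def getMsgToSend(command):
--   msg = ''
--   counter = 0
--   for i in command:
--     if (i == ' '):
--       counter += 1
--     if counter >= 2:
--       msg += i
--   return msg
-- ===== SOURCE B (Python) =====
-- def getMsgToSend(command):
--     first = command.find(' ')
--     if first == -1:
--         return ''
--     second = command.find(' ', first + 1)
--     if second == -1:
--         return ''
--     return command[second:]
-- ===== Notes on version B (the rewrite author's own statement) =====
-- stated objective: simpler
-- what changed: Replaces A's character-by-character loop with a space counter and incremental string accumulation by two find() calls locating the second space and one slice from it.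
import Mathlib
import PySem

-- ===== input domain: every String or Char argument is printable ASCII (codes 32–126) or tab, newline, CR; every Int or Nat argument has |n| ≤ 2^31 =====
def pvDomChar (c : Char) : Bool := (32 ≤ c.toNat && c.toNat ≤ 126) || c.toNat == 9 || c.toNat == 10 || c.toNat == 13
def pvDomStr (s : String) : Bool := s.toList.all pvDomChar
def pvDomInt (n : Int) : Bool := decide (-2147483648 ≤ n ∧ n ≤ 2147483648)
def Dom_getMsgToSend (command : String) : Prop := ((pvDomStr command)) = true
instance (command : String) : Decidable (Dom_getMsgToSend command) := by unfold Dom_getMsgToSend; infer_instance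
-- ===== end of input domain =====

-- B replaces A's per-character counting loop with two find() calls and a slice; objective: simpler.


-- ===== PORT A =====
-- for i in command: if i == ' ': counter += 1; if counter >= 2: msg += i
def getMsgToSend (command : String) : String :=
  let st := command.toList.foldl
    (fun (st : List Char × Int) (i : Char) =>
      let counter := if i = ' ' then st.2 + 1 else st.2
      let msg := if counter ≥ 2 then st.1 ++ [i] else st.1
      (msg, counter))
    ([], 0)
  String.ofList st.1

-- ===== PORT B =====
-- first = command.find(' '); second = command.find(' ', first+1); return command[second:]
def getMsgToSend_alt (command : String) : String :=
  let first := PySem.Str.find command " "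
  if first = -1 then ""
  else
    let second := PySem.Str.findFrom command " " (first + 1)
    if second = -1 then ""
    else PySem.Str.slice command (some second) none

-- ===== PRECONDITION & SPEC =====
def Spec_getMsgToSend (command : String) (out : String) : Prop := out = getMsgToSend_alt command
instance (command : String) (out : String) : Decidable (Spec_getMsgToSend command out) := by unfold Spec_getMsgToSend; infer_instance

-- ===== CLAIM (what is proved, stated in full; the proofs are below) =====
def Claim_equal_getMsgToSend : Prop := ∀ (command : String), Dom_getMsgToSend command → Spec_getMsgToSend command (getMsgToSend command)

-- ===== LEMMAS AND PROOFS =====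

-- A's loop step
def pvStep (st : List Char × Int) (i : Char) : List Char × Int :=
  let counter := if i = ' ' then st.2 + 1 else st.2
  let msg := if counter ≥ 2 then st.1 ++ [i] else st.1
  (msg, counter)

-- suffix of l from its first space (inclusive); [] if no space
def pvAfter1 : List Char → List Char
  | [] => []
  | c :: cs => if c = ' ' then c :: cs else pvAfter1 cs

-- suffix of l from its second space (inclusive); [] if fewer than two spaces
def pvAfter2 : List Char → List Char
  | [] => []
  | c :: cs => if c = ' ' then pvAfter1 cs else pvAfter2 cs

theorem pvFold2 (l : List Char) (msg : List Char) (c : Int) (hc : 2 ≤ c) :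
    (l.foldl pvStep (msg, c)).1 = msg ++ l := by
  induction l generalizing msg c with
  | nil => simp
  | cons x xs ih =>
    simp only [List.foldl_cons, pvStep]
    by_cases hx : x = ' '
    · simp only [if_pos hx]
      rw [if_pos (by omega : c + 1 ≥ 2), ih _ _ (by omega)]
      simp
    · simp only [if_neg hx]
      rw [if_pos (by omega : c ≥ 2), ih _ _ hc]
      simp

theorem pvFold1 (l : List Char) (msg : List Char) :
    (l.foldl pvStep (msg, 1)).1 = msg ++ pvAfter1 l := by
  induction l generalizing msg with
  | nil => simp [pvAfter1]
  | cons x xs ih =>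
    simp only [List.foldl_cons, pvStep, pvAfter1]
    by_cases hx : x = ' '
    · simp [hx]
      rw [pvFold2 xs (msg ++ [' ']) 2 le_rfl]
      simp
    · simp [hx, ih]

theorem pvFold0 (l : List Char) (msg : List Char) :
    (l.foldl pvStep (msg, 0)).1 = msg ++ pvAfter2 l := by
  induction l generalizing msg with
  | nil => simp [pvAfter2]
  | cons x xs ih =>
    simp only [List.foldl_cons, pvStep, pvAfter2]
    by_cases hx : x = ' '
    · simp [hx, pvFold1]
    · simp [hx, ih]

-- [a] is a prefix of m iff m starts with a
theorem pvSingleton_prefix (a : Char) (m : List Char) : [a] <+: m ↔ m.head? = some a := by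
  cases m with
  | nil => simp
  | cons x xs =>
    constructor
    · rintro ⟨t, ht⟩; simp at ht; simp [ht.1]
    · intro h; simp at h; exact ⟨xs, by simp [h]⟩

theorem pvPrefix_drop_iff (a : Char) (l : List Char) (i : Nat) :
    [a] <+: l.drop i ↔ l[i]? = some a := by
  rw [pvSingleton_prefix, List.head?_drop]

theorem pvNoSpace (m : List Char) (h : ¬ ([' '] <:+: m)) : ∀ i : Nat, m[i]? ≠ some ' ' := by
  intro i hi
  exact h (((pvPrefix_drop_iff ' ' m i).mpr hi).isInfix.trans (List.drop_suffix i m).isInfix)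


-- pvAfter1 of a list with no space is []
theorem pvAfter1_no_space (l : List Char) (h : ∀ i : Nat, l[i]? ≠ some ' ') : pvAfter1 l = [] := by
  induction l with
  | nil => rfl
  | cons x xs ih =>
    have h0 := h 0
    simp at h0
    simp [pvAfter1, h0]
    exact ih (fun i => by have := h (i + 1); simpa using this)

-- pvAfter1 with first space at index j
theorem pvAfter1_at (l : List Char) (j : Nat) (hj : l[j]? = some ' ')
    (hmin : ∀ i, i < j → l[i]? ≠ some ' ') : pvAfter1 l = l.drop j := by
  induction l generalizing j with
  | nil => simp at hj
  | cons x xs ih =>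
    cases j with
    | zero => simp at hj; simp [pvAfter1, hj]
    | succ j =>
      have h0 := hmin 0 (Nat.succ_pos _)
      simp at h0 hj
      simp [pvAfter1, h0]
      exact ih j hj (fun i hi => by have := hmin (i + 1) (by omega); simpa using this)

theorem pvAfter2_no_space (l : List Char) (h : ∀ i : Nat, l[i]? ≠ some ' ') : pvAfter2 l = [] := by
  induction l with
  | nil => rfl
  | cons x xs ih =>
    have h0 := h 0
    simp at h0
    simp [pvAfter2, h0]
    exact ih (fun i => by have := h (i + 1); simpa using this)

-- pvAfter2 reduces to pvAfter1 after the first space (at index k)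
theorem pvAfter2_at (l : List Char) (k : Nat) (hk : l[k]? = some ' ')
    (hmin : ∀ i, i < k → l[i]? ≠ some ' ') : pvAfter2 l = pvAfter1 (l.drop (k + 1)) := by
  induction l generalizing k with
  | nil => simp at hk
  | cons x xs ih =>
    cases k with
    | zero => simp at hk; simp [pvAfter2, hk]
    | succ k =>
      have h0 := hmin 0 (Nat.succ_pos _)
      simp at h0 hk
      simp [pvAfter2, h0, List.drop_succ_cons]
      exact ih k hk (fun i hi => by have := hmin (i + 1) (by omega); simpa using this)

-- ===== VERDICT (by name: the statement is the Claim_ definition above) =====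
theorem getMsgToSend_spec : Claim_equal_getMsgToSend := by
  intro command _
  unfold Spec_getMsgToSend getMsgToSend getMsgToSend_alt
  set l := command.toList with hl
  have hfold : (l.foldl pvStep ([], 0)).1 = pvAfter2 l := pvFold0 l []
  have hspace : " ".toList = [' '] := rfl
  by_cases h1 : PySem.Str.find command " " = -1
  · -- no space at all
    simp only [h1]
    have hno : ¬ ([' '] <:+: l) := by
      have := (PySem.Str.find_eq_neg_one_iff (s := command) (sub := " ")).mp h1
      simpa [hspace] using this
    have hno' := pvNoSpace l hno
    show String.ofList (l.foldl pvStep ([], 0)).1 = ""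
    rw [hfold, pvAfter2_no_space l hno']
  · simp only [h1]
    have hfind : PySem.Str.find command " " = PySem.Chars.find l [' '] := by
      rw [← hspace]; simp [hl]
    have hpos : 0 ≤ PySem.Chars.find l [' '] := by
      rcases (PySem.Chars.neg_one_le_find (s := l) (sub := [' '])).lt_or_eq with h | h
      · omega
      · exfalso; exact h1 (by rw [hfind, ← h])
    set k := (PySem.Chars.find l [' ']).toNat with hkdef
    have hkeq : PySem.Chars.find l [' '] = (k : Int) := by omega
    obtain ⟨hpre, hminp⟩ := PySem.Chars.find_spec (s := l) (sub := [' ']) hpos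
    have hk : l[k]? = some ' ' := (pvPrefix_drop_iff ' ' l k).mp hpre
    have hmin : ∀ i, i < k → l[i]? ≠ some ' ' := by
      intro i hi hcontra
      exact hminp i hi ((pvPrefix_drop_iff ' ' l i).mpr hcontra)
    have hklen : k < l.length := by
      rcases List.getElem?_eq_some_iff.mp hk with ⟨h, _⟩; exact h
    -- findFrom at k+1
    have hfF : PySem.Str.findFrom command " " (PySem.Str.find command " " + 1) =
        PySem.Chars.findFrom l [' '] ((k + 1 : Nat) : Int) := by
      rw [hfind, hkeq]
      push_cast
      simp [hl, ← hspace]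
    rw [PySem.Chars.findFrom_natCast l [' '] (k + 1) (by omega)] at hfF
    have h2at := pvAfter2_at l k hk hmin
    by_cases h2 : PySem.Chars.find (l.drop (k + 1)) [' '] = -1
    · -- no second space
      rw [if_pos h2] at hfF
      simp only [hfF]
      have hno : ¬ ([' '] <:+: l.drop (k + 1)) := by
        exact (PySem.Chars.find_eq_neg_one_iff (s := l.drop (k+1)) (sub := [' '])).mp h2
      have hno' := pvNoSpace _ hno
      show String.ofList (l.foldl pvStep ([], 0)).1 = ""
      rw [hfold, h2at, pvAfter1_no_space _ hno']
    · rw [if_neg h2] at hfF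
      have hpos2 : 0 ≤ PySem.Chars.find (l.drop (k+1)) [' '] := by
        rcases (PySem.Chars.neg_one_le_find (s := l.drop (k+1)) (sub := [' '])).lt_or_eq with h | h
        · omega
        · exact absurd h.symm h2
      set j := (PySem.Chars.find (l.drop (k+1)) [' ']).toNat with hjdef
      have hjeq : PySem.Chars.find (l.drop (k+1)) [' '] = (j : Int) := by omega
      obtain ⟨hpre2, hminp2⟩ := PySem.Chars.find_spec (s := l.drop (k+1)) (sub := [' ']) hpos2
      have hj : (l.drop (k+1))[j]? = some ' ' := (pvPrefix_drop_iff ' ' _ j).mp hpre2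
      have hmin2 : ∀ i, i < j → (l.drop (k+1))[i]? ≠ some ' ' := by
        intro i hi hcontra
        exact hminp2 i hi ((pvPrefix_drop_iff ' ' _ i).mpr hcontra)
      have hne : ¬ (PySem.Str.findFrom command " " (PySem.Str.find command " " + 1) = -1) := by
        rw [hfF]; omega
      simp only [hne]
      have h1at := pvAfter1_at (l.drop (k+1)) j hj hmin2
      -- B's slice
      have hsl : PySem.Str.slice command (some (PySem.Str.findFrom command " " (PySem.Str.find command " " + 1))) none
          = String.ofList (l.drop (k + 1 + j)) := by
        have : PySem.Str.findFrom command " " (PySem.Str.find command " " + 1) = ((k + 1 + j : Nat) : Int) := by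
          rw [hfF, hjeq]; push_cast; ring
        rw [this]
        apply String.toList_injective
        rw [PySem.Str.toList_slice, PySem.Chars.slice_eq_listSlice, PySem.List.slice_from_natCast]
        simp [hl]
      rw [hsl]
      show String.ofList (l.foldl pvStep ([], 0)).1 = String.ofList (l.drop (k + 1 + j))
      rw [hfold, h2at, h1at, List.drop_drop]
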